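-- pv_equiv track=rewrite | github.com/ankitshah009/leetcode_python | graphs/1527-patients_with_a_condition.py | patientsWithCondition
-- ===== SOURCE A (Python) =====
-- from typing import List
--
-- def patientsWithCondition(patients: List[dict]) -> List[dict]:
--     """
--     Explicit check for DIAB1 prefix.
--     """
--     def has_type1_diabetes(conditions: str) -> bool:
--         if not conditions:
--             return False
--
--         # Split by spaces
--         codes = conditions.split()
--
--         for code in codes:
--             if code.startswith('DIAB1'):
--                 return True
--
--         return False
--
--     return [p for p in patients if has_type1_diabetes(p.get('conditions', ''))]
-- ===== SOURCE B (Python) =====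
-- from typing import List
--
-- def patientsWithCondition(patients: List[dict]) -> List[dict]:
--     """
--     Single character-level scan: DIAB1 occurring at string start or right
--     after a whitespace character, without tokenizing the string.
--     """
--     def hit(s: str) -> bool:
--         prev_ws = True
--         for i, ch in enumerate(s):
--             if prev_ws and s.startswith('DIAB1', i):
--                 return True
--             prev_ws = ch.isspace()
--         return False
--
--     return [p for p in patients if hit(p.get('conditions', ''))]
-- ===== Notes on version B (the rewrite author's own statement) =====
-- stated objective: alternative
-- what changed: Replaces split-into-codes-then-scan-each-code with a single character-level scan that tests for a 'DIAB1' occurrence at the string start or immediately after a whitespace character, never building the token list.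
import Mathlib
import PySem

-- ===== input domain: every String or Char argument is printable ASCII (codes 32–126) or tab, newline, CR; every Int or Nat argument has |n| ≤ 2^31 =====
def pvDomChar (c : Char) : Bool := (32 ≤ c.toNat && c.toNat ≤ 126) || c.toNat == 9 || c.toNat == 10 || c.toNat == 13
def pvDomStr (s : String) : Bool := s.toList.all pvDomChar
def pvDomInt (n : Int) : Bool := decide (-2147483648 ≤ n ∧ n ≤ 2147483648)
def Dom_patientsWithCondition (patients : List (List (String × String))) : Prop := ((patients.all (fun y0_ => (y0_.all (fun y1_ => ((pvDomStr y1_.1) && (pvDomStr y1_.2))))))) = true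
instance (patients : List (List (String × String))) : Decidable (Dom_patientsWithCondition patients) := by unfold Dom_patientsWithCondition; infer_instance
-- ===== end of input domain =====

-- B replaces A's split-into-codes-then-scan-each-code by a single character-level
-- scan for 'DIAB1' at the string start or right after whitespace (alternative, same cost).

-- ===== PORT A =====
-- helper has_type1_diabetes of A
def pvHasT1D (conditions : String) : Bool :=
  if conditions == "" then false
  else
    -- codes = conditions.split(); for code in codes: if code.startswith('DIAB1'): return True; return False
    (PySem.Str.split₀ conditions).any (fun code => PySem.Str.startswith code "DIAB1")

def patientsWithCondition (patients : List (List (String × String))) : List (List (String × String)) :=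
  patients.filter (fun p => pvHasT1D ((PySem.Dict.mk p).getD "conditions" ""))

-- ===== PORT B =====
-- helper hit of B: loop over positions carrying prev_ws, checking s.startswith('DIAB1', i),
-- ported as the structural recursion over the remaining suffix
def pvHit : Bool → List Char → Bool
  | _, [] => false
  | prevWs, c :: rest =>
    if prevWs && PySem.Chars.startswith (c :: rest) ['D', 'I', 'A', 'B', '1'] then true
    else pvHit (PySem.Chars.isspace c) rest

def patientsWithCondition_alt (patients : List (List (String × String))) : List (List (String × String)) :=
  patients.filter (fun p => pvHit true ((PySem.Dict.mk p).getD "conditions" "").toList)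

-- ===== PRECONDITION & SPEC =====
def Spec_patientsWithCondition (patients : List (List (String × String))) (out : List (List (String × String))) : Prop := out = patientsWithCondition_alt patients
instance (patients : List (List (String × String))) (out : List (List (String × String))) : Decidable (Spec_patientsWithCondition patients out) := by unfold Spec_patientsWithCondition; infer_instance

-- ===== CLAIM (what is proved, stated in full; the proofs are below) =====
def Claim_equal_patientsWithCondition : Prop := ∀ (patients : List (List (String × String))), Dom_patientsWithCondition patients → Spec_patientsWithCondition patients (patientsWithCondition patients)

-- ===== LEMMAS AND PROOFS =====

-- the pattern 'DIAB1' contains no whitespace character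
lemma pvDia_nonspace : ∀ c ∈ ['D', 'I', 'A', 'B', '1'], PySem.Chars.isspace c = false := by
  intro c hc
  fin_cases hc <;> rfl

-- a whitespace character cannot start the pattern
lemma pvNoStart_of_space (c : Char) (rest : List Char)
    (h : PySem.Chars.isspace c = true) :
    PySem.Chars.startswith (c :: rest) ['D', 'I', 'A', 'B', '1'] = false := by
  simp only [PySem.Chars.startswith, List.isPrefixOf]
  have hD : (('D' : Char) == c) = false := by
    by_contra hc
    rw [Bool.not_eq_false, beq_iff_eq] at hc
    rw [← hc] at h
    simp [PySem.Chars.isspace] at h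
  simp [hD]

-- for a whitespace-free pattern p, p prefixes the leading nonspace run iff it prefixes the list
lemma pvPrefix_takeWhile (p : List Char) (hp : ∀ c ∈ p, PySem.Chars.isspace c = false) :
    ∀ l : List Char,
      p.isPrefixOf (l.takeWhile (fun c => !PySem.Chars.isspace c)) = p.isPrefixOf l := by
  induction p with
  | nil => intro l; simp [List.isPrefixOf]
  | cons d ds ih =>
    intro l
    cases l with
    | nil => simp [List.isPrefixOf]
    | cons x xs =>
      by_cases hx : PySem.Chars.isspace x = true
      · have hd : (d == x) = false := by
          by_contra hc
          rw [Bool.not_eq_false, beq_iff_eq] at hc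
          have := hp d (by simp)
          rw [hc, hx] at this; exact Bool.false_ne_true this.symm
        simp [List.takeWhile, hx, List.isPrefixOf, hd]
      · rw [Bool.not_eq_true] at hx
        have ih' := ih (fun c hc => hp c (by simp [hc])) xs
        simp [List.takeWhile, hx, List.isPrefixOf, ih']

-- the generalized invariant relating split₀'s worker to B's scan
lemma pvGo_any (s : List Char) :
    ∀ (cur : List Char) (acc : List (List Char)),
      ((PySem.Chars.split₀.go s cur acc).any
          (fun w => PySem.Chars.startswith w ['D', 'I', 'A', 'B', '1'])) =
        (acc.any (fun w => PySem.Chars.startswith w ['D', 'I', 'A', 'B', '1']) ||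
          (if cur.isEmpty then pvHit true s
           else
             (PySem.Chars.startswith
                (cur.reverse ++ s.takeWhile (fun c => !PySem.Chars.isspace c))
                ['D', 'I', 'A', 'B', '1'] ||
              pvHit false s))) := by
  induction s with
  | nil =>
    intro cur acc
    cases cur with
    | nil => simp [PySem.Chars.split₀.go, pvHit]
    | cons c cs =>
      simp [PySem.Chars.split₀.go, pvHit, Bool.or_comm]
  | cons c rest ih =>
    intro cur acc
    by_cases hc : PySem.Chars.isspace c = true
    · cases cur with
      | nil =>
        rw [show PySem.Chars.split₀.go (c :: rest) [] acc = PySem.Chars.split₀.go rest [] acc by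
              simp [PySem.Chars.split₀.go, hc]]
        rw [ih [] acc]
        simp [pvHit, pvNoStart_of_space c rest hc, hc]
      | cons x xs =>
        rw [show PySem.Chars.split₀.go (c :: rest) (x :: xs) acc
              = PySem.Chars.split₀.go rest [] ((x :: xs).reverse :: acc) by
              simp [PySem.Chars.split₀.go, hc]]
        rw [ih [] ((x :: xs).reverse :: acc)]
        simp [pvHit, pvNoStart_of_space c rest hc, hc, List.takeWhile,
          Bool.or_assoc, Bool.or_comm]
    · rw [Bool.not_eq_true] at hc
      rw [show PySem.Chars.split₀.go (c :: rest) cur acc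
            = PySem.Chars.split₀.go rest (c :: cur) acc by
            simp [PySem.Chars.split₀.go, hc]]
      rw [ih (c :: cur) acc]
      cases cur with
      | nil =>
        have key : PySem.Chars.startswith (c :: rest.takeWhile (fun c => !PySem.Chars.isspace c))
            ['D', 'I', 'A', 'B', '1']
            = PySem.Chars.startswith (c :: rest) ['D', 'I', 'A', 'B', '1'] := by
          have := pvPrefix_takeWhile ['D', 'I', 'A', 'B', '1'] pvDia_nonspace (c :: rest)
          simpa [PySem.Chars.startswith, List.takeWhile, hc] using this
        rw [show pvHit true (c :: rest)
              = (PySem.Chars.startswith (c :: rest) ['D', 'I', 'A', 'B', '1']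
                  || pvHit (PySem.Chars.isspace c) rest) by
              cases hsw : PySem.Chars.startswith (c :: rest) ['D', 'I', 'A', 'B', '1'] <;>
                simp [pvHit, hsw]]
        rw [hc]
        simp [key]
      | cons x xs =>
        rw [show pvHit false (c :: rest) = pvHit (PySem.Chars.isspace c) rest by
              simp [pvHit]]
        rw [hc]
        simp [List.takeWhile, hc]

-- A's helper equals B's scan on every string
lemma pvHasT1D_eq (conditions : String) :
    pvHasT1D conditions = pvHit true conditions.toList := by
  unfold pvHasT1D
  by_cases h : conditions = ""
  · subst h; simp [pvHit]
  · rw [if_neg (by simpa using h)]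
    have hb : (PySem.Str.split₀ conditions).any (fun code => PySem.Str.startswith code "DIAB1")
        = (PySem.Chars.split₀ conditions.toList).any
            (fun w => PySem.Chars.startswith w ['D', 'I', 'A', 'B', '1']) := by
      rw [← PySem.Str.split₀_map_toList, List.any_map]
      have hsw : ∀ code : String, PySem.Str.startswith code "DIAB1"
          = PySem.Chars.startswith code.toList ['D', 'I', 'A', 'B', '1'] := by
        intro code; rw [PySem.Str.startswith_eq]; rfl
      simp only [Function.comp_def, hsw]
    rw [hb]
    have := pvGo_any conditions.toList [] []
    simpa [PySem.Chars.split₀] using this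

-- ===== VERDICT (by name: the statement is the Claim_ definition above) =====
theorem patientsWithCondition_spec : Claim_equal_patientsWithCondition := by
  intro patients _
  unfold Spec_patientsWithCondition patientsWithCondition patientsWithCondition_alt
  apply List.filter_congr
  intro p _
  exact pvHasT1D_eq _
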